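-- pv_equiv track=rewrite | github.com/nicolashernandez/PyRATA | do_control-time-memory-usage.py | getManualData
-- ===== SOURCE A (Python) =====
-- def getManualData(dataSize, vocabSize, patternOccurence):
--     """Creates artificial data meant for speed testing.
--     If vocabSize is 1 then all token will be pattern occurence.
--     Considers {'v': '0'} to be a matching token and {'v': '1'} to be a non matching token."""
--
--     #makes it impossible to have both full vocabulary and all of the pattern occurences
--     if(dataSize<=vocabSize+patternOccurence):
--         return None
--     if(vocabSize == 1):
--         patternOccurence = dataSize
--
--     retValue = []
--     patternOccurenceCount = 0
--
--     for i in range(1, vocabSize):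
--         retValue.append({'v': str(i)})
--     for i in range (vocabSize+1, dataSize+1):
--         if(patternOccurenceCount<patternOccurence):
--             retValue.append({'v': '0'})
--             patternOccurenceCount+=1
--         else:
--             retValue.append({'v': '1'})
--
--     return retValue
-- ===== SOURCE B (Python) =====
-- def getManualData(dataSize, vocabSize, patternOccurence):
--     """Creates artificial data meant for speed testing (closed-form segment version)."""
--     if dataSize <= vocabSize + patternOccurence:
--         return None
--     if vocabSize == 1:
--         patternOccurence = dataSize
--     n = max(0, dataSize - vocabSize)
--     zeros = max(0, min(patternOccurence, n))
--     return ([{'v': str(i)} for i in range(1, vocabSize)]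
--             + [{'v': '0'} for _ in range(zeros)]
--             + [{'v': '1'} for _ in range(n - zeros)])
-- ===== Notes on version B (the rewrite author's own statement) =====
-- stated objective: simpler
-- what changed: Replaces the counter-driven if/else loop over range(vocabSize+1, dataSize+1) by computing the segment lengths in closed form (zeros = clamp(patternOccurence, 0, dataSize-vocabSize)) and emitting three concatenated segments.
import Mathlib
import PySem

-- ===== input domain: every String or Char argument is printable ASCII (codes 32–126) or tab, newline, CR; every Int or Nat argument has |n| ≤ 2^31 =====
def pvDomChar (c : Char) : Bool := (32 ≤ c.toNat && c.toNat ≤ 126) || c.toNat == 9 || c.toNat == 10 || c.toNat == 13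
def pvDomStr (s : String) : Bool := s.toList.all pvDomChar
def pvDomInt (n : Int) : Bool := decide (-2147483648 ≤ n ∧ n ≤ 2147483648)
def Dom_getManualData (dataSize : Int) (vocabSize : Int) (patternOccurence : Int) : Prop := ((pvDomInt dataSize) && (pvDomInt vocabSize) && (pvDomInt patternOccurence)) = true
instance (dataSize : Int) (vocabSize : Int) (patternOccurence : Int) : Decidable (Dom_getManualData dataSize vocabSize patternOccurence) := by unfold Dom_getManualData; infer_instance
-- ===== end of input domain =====

-- B builds the same list from three closed-form segments instead of A's counter-driven loop; objective: simpler.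

-- ===== PORT A =====
-- literal port: the second loop is a foldl carrying (retValue, patternOccurenceCount)
def getManualData (dataSize : Int) (vocabSize : Int) (patternOccurence : Int) : Option (List (List (String × String))) :=
  if dataSize ≤ vocabSize + patternOccurence then none
  else
    some ((PySem.List.pyRange (vocabSize + 1) (dataSize + 1) 1).foldl
        (fun (s : List (List (String × String)) × Int) _ =>
          if s.2 < (if vocabSize = 1 then dataSize else patternOccurence) then (s.1 ++ [[("v", "0")]], s.2 + 1)
          else (s.1 ++ [[("v", "1")]], s.2))
        ((PySem.List.pyRange 1 vocabSize 1).map (fun i => [("v", PySem.Int.toStr i)]), 0)).1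

-- ===== PORT B =====
def getManualData_alt (dataSize : Int) (vocabSize : Int) (patternOccurence : Int) : Option (List (List (String × String))) :=
  if dataSize ≤ vocabSize + patternOccurence then none
  else
    some ((PySem.List.pyRange 1 vocabSize 1).map (fun i => [("v", PySem.Int.toStr i)])
      ++ List.replicate (max 0 (min (if vocabSize = 1 then dataSize else patternOccurence) (max 0 (dataSize - vocabSize)))).toNat [("v", "0")]
      ++ List.replicate (max 0 (dataSize - vocabSize) - max 0 (min (if vocabSize = 1 then dataSize else patternOccurence) (max 0 (dataSize - vocabSize)))).toNat [("v", "1")])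

-- ===== PRECONDITION & SPEC =====
def Spec_getManualData (dataSize : Int) (vocabSize : Int) (patternOccurence : Int) (out : Option (List (List (String × String)))) : Prop := out = getManualData_alt dataSize vocabSize patternOccurence
instance (dataSize : Int) (vocabSize : Int) (patternOccurence : Int) (out : Option (List (List (String × String)))) : Decidable (Spec_getManualData dataSize vocabSize patternOccurence out) := by unfold Spec_getManualData; infer_instance

-- ===== CLAIM (what is proved, stated in full; the proofs are below) =====
def Claim_equal_getManualData : Prop := ∀ (dataSize : Int) (vocabSize : Int) (patternOccurence : Int), Dom_getManualData dataSize vocabSize patternOccurence → Spec_getManualData dataSize vocabSize patternOccurence (getManualData dataSize vocabSize patternOccurence)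

-- ===== LEMMAS AND PROOFS =====

-- invariant of A's second loop: fold of the if/else counter step = two replicate segments
theorem foldl_counter_segments (po : Int) (l : List Int) (acc : List (List (String × String))) (c : Int) :
    (l.foldl
      (fun (s : List (List (String × String)) × Int) _ =>
        if s.2 < po then (s.1 ++ [[("v", "0")]], s.2 + 1)
        else (s.1 ++ [[("v", "1")]], s.2))
      (acc, c)).1
    = acc ++ List.replicate (min (po - c).toNat l.length) [("v", "0")]
          ++ List.replicate (l.length - min (po - c).toNat l.length) [("v", "1")] := by
  induction l generalizing acc c with
  | nil => simp
  | cons a l ih =>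
    simp only [List.foldl_cons, List.length_cons]
    by_cases h : c < po
    · rw [if_pos h, ih]
      have hz : min (po - c).toNat (l.length + 1) = min (po - (c + 1)).toNat l.length + 1 := by
        omega
      rw [hz]
      simp [List.replicate_succ, Nat.succ_sub_succ]
    · rw [if_neg h, ih]
      have hz : min (po - c).toNat (l.length + 1) = 0 := by omega
      have hz2 : min (po - c).toNat l.length = 0 := by omega
      rw [hz, hz2]
      simp [List.replicate_succ]

-- ===== VERDICT (by name: the statement is the Claim_ definition above) =====
theorem getManualData_spec : Claim_equal_getManualData := by
  intro dataSize vocabSize patternOccurence _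
  unfold Spec_getManualData getManualData getManualData_alt
  by_cases hguard : dataSize ≤ vocabSize + patternOccurence
  · simp [hguard]
  · rw [if_neg hguard, if_neg hguard]
    set po := if vocabSize = 1 then dataSize else patternOccurence with hpo
    rw [foldl_counter_segments po]
    have hlen : (PySem.List.pyRange (vocabSize + 1) (dataSize + 1) 1).length
        = (dataSize - vocabSize).toNat := by
      rw [PySem.List.length_pyRange_one]; congr 1; omega
    rw [hlen]
    have h1 : min (po - 0).toNat (dataSize - vocabSize).toNat
        = (max 0 (min po (max 0 (dataSize - vocabSize)))).toNat := by omega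
    rw [h1]
    have h2 : (dataSize - vocabSize).toNat - (max 0 (min po (max 0 (dataSize - vocabSize)))).toNat
        = (max 0 (dataSize - vocabSize) - max 0 (min po (max 0 (dataSize - vocabSize)))).toNat := by
      omega
    rw [h2]
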